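-- pv_equiv track=rewrite | github.com/AshishHoodaIITD/competitive_coding | cdf648/d.py | bound_B
-- ===== SOURCE A (Python) =====
-- def bound_B(grid):
--     flag = True
--     hash_updates = 0
--     updates = [(0,0), (-1,0), (1,0), (0,1),(0,-1)]
--     update_list = []
--     for r in range(len(grid)):
--         for c in range(len(grid[0])):
--             if grid[r][c] == "B":
--                 for up in updates:
--                     if r+up[0] >= 0 and r+up[0] < len(grid) and c+up[1] >= 0 and c+up[1] < len(grid[0]):
--                         update_list.append((r+up[0], c+up[1]))
--     for r,c in update_list:
--         if grid[r][c] == "G":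
--             flag = False
--             break
--         else:
--             grid[r][c] = "#"
--             hash_updates+=1
--     return flag, grid, hash_updates
-- ===== SOURCE B (Python) =====
-- def bound_B(grid):
--     bcells = [(r, c) for r in range(len(grid)) for c in range(len(grid[0])) if grid[r][c] == "B"]
--     hash_updates = 0
--     for r, c in bcells:
--         for dr, dc in ((0, 0), (-1, 0), (1, 0), (0, 1), (0, -1)):
--             nr, nc = r + dr, c + dc
--             if 0 <= nr < len(grid) and 0 <= nc < len(grid[0]):
--                 if grid[nr][nc] == "G":
--                     return False, grid, hash_updates
--                 grid[nr][nc] = "#"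
--                 hash_updates += 1
--     return True, grid, hash_updates
-- ===== Notes on version B (the rewrite author's own statement) =====
-- stated objective: simpler
-- what changed: B drops the intermediate flat update_list of ~5x neighbor coordinates: it records only the B-cell coordinates (taken from the original grid, so later '#' overwrites cannot hide a B), then for each B cell expands the five offsets on the fly, mutating or returning early on the first adjacent 'G'.
import Mathlib
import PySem

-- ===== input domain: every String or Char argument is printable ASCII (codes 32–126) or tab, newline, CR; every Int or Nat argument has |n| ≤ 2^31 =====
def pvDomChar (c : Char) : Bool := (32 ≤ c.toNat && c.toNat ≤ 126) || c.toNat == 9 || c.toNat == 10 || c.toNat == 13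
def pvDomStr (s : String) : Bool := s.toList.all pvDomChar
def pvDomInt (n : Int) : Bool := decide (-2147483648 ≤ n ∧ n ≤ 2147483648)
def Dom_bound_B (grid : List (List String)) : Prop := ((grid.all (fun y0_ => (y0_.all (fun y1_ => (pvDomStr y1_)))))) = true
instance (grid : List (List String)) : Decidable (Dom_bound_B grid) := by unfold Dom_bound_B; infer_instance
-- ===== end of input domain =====

-- B fuses the neighbour-expansion pass into the mutation pass (keeping only the B-cell
-- coordinates, no flat update_list) and exits early on the first 'G'; objective: simpler.
-- Both Pythons mutate `grid` in place; the equivalence here is about the returned triple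
-- (whose second component is the final grid, so the mutation is covered too).

-- ===== PORT A =====
def pvCell (g : List (List String)) (r c : Nat) : String := (g.getD r []).getD c ""
def pvSet (g : List (List String)) (r c : Nat) (v : String) : List (List String) :=
  g.set r ((g.getD r []).set c v)
def pvUpdates : List (Int × Int) := [(0,0),(-1,0),(1,0),(0,1),(0,-1)]
def pvInB (H W : Nat) (a b : Int) : Bool :=
  decide (0 ≤ a) && decide (a < (H:Int)) && decide (0 ≤ b) && decide (b < (W:Int))

-- phase 2 of A: walk update_list, break on first 'G', else write '#'
def pvApply : List (Nat × Nat) → List (List String) → Int → Bool × List (List String) × Int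
  | [], g, h => (true, g, h)
  | (r, c) :: rest, g, h =>
    if pvCell g r c = "G" then (false, g, h)
    else pvApply rest (pvSet g r c "#") (h + 1)

def bound_B (grid : List (List String)) : Bool × List (List String) × Int :=
  let H := grid.length
  let W := (grid.headD []).length
  let update_list : List (Nat × Nat) :=
    (List.range H).foldl (fun acc r =>
      (List.range W).foldl (fun acc c =>
        if pvCell grid r c = "B" then
          pvUpdates.foldl (fun acc up =>
            if pvInB H W ((r:Int) + up.1) ((c:Int) + up.2) then
              acc ++ [(((r:Int) + up.1).toNat, ((c:Int) + up.2).toNat)]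
            else acc) acc
        else acc) acc) []
  pvApply update_list grid 0

-- ===== PORT B =====
-- one B cell: walk the five offsets, mutate / stop immediately
def pvAltCell (H W r c : Nat) :
    List (Int × Int) → List (List String) → Int → Bool × List (List String) × Int
  | [], g, h => (true, g, h)
  | (dr, dc) :: rest, g, h =>
    if pvInB H W ((r:Int) + dr) ((c:Int) + dc) then
      if pvCell g ((r:Int) + dr).toNat ((c:Int) + dc).toNat = "G" then (false, g, h)
      else pvAltCell H W r c rest (pvSet g ((r:Int) + dr).toNat ((c:Int) + dc).toNat "#") (h + 1)
    else pvAltCell H W r c rest g h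

def pvAltCells (H W : Nat) :
    List (Nat × Nat) → List (List String) → Int → Bool × List (List String) × Int
  | [], g, h => (true, g, h)
  | (r, c) :: rest, g, h =>
    match pvAltCell H W r c pvUpdates g h with
    | (true, g', h') => pvAltCells H W rest g' h'
    | (false, g', h') => (false, g', h')

def bound_B_alt (grid : List (List String)) : Bool × List (List String) × Int :=
  let H := grid.length
  let W := (grid.headD []).length
  let bcells : List (Nat × Nat) :=
    (List.range H).foldl (fun acc r =>
      (List.range W).foldl (fun acc c =>
        if pvCell grid r c = "B" then acc ++ [(r, c)] else acc) acc) []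
  pvAltCells H W bcells grid 0

-- ===== PRECONDITION & SPEC =====
-- Pre_ excludes exactly the inputs where Python A raises IndexError:
-- nonempty grids with a row shorter than row 0.
def Pre_bound_B (grid : List (List String)) : Prop :=
  ∀ row ∈ grid, (grid.headD []).length ≤ row.length
instance (grid : List (List String)) : Decidable (Pre_bound_B grid) := by
  unfold Pre_bound_B; infer_instance
def pvWitness_bound_B : List (List String) := [["B", "."], [".", "G"]]

def Spec_bound_B (grid : List (List String)) (out : Bool × List (List String) × Int) : Prop := out = bound_B_alt grid
instance (grid : List (List String)) (out : Bool × List (List String) × Int) : Decidable (Spec_bound_B grid out) := by unfold Spec_bound_B; infer_instance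

-- ===== CLAIM (what is proved, stated in full; the proofs are below) =====
def Claim_equal_bound_B : Prop := ∀ (grid : List (List String)), Dom_bound_B grid → Pre_bound_B grid → Spec_bound_B grid (bound_B grid)

-- ===== LEMMAS AND PROOFS =====

-- neighbour list of one cell, in A's offset order (proof-side characterisation)
def pvNl (H W r c : Nat) : List (Nat × Nat) :=
  (pvUpdates.filter (fun up => pvInB H W ((r:Int) + up.1) ((c:Int) + up.2))).map
    (fun up => ((((r:Int) + up.1).toNat, ((c:Int) + up.2).toNat)))

theorem pvApply_append (l1 l2 : List (Nat × Nat)) (g : List (List String)) (h : Int) :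
    pvApply (l1 ++ l2) g h =
      match pvApply l1 g h with
      | (true, g', h') => pvApply l2 g' h'
      | (false, g', h') => (false, g', h') := by
  induction l1 generalizing g h with
  | nil => simp [pvApply]
  | cons x rest ih =>
    obtain ⟨r, c⟩ := x
    simp only [List.cons_append, pvApply]
    by_cases hg : pvCell g r c = "G" <;> simp [hg, ih]

theorem pvAltCell_eq (H W r c : Nat) (offs : List (Int × Int)) (g : List (List String)) (h : Int) :
    pvAltCell H W r c offs g h =
      pvApply ((offs.filter (fun up => pvInB H W ((r:Int) + up.1) ((c:Int) + up.2))).map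
        (fun up => ((((r:Int) + up.1).toNat, ((c:Int) + up.2).toNat)))) g h := by
  induction offs generalizing g h with
  | nil => simp [pvAltCell, pvApply]
  | cons up rest ih =>
    obtain ⟨dr, dc⟩ := up
    by_cases hb : pvInB H W ((r:Int) + dr) ((c:Int) + dc)
    · by_cases hg : pvCell g ((r:Int) + dr).toNat ((c:Int) + dc).toNat = "G" <;>
        simp [pvAltCell, hb, hg, pvApply, ih]
    · simp [pvAltCell, hb, List.filter_cons_of_neg, ih]

theorem pv_main (H W : Nat) (grid : List (List String)) (cl : List (Nat × Nat))
    (g : List (List String)) (h : Int) :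
    pvApply (cl.flatMap (fun rc =>
        if pvCell grid rc.1 rc.2 = "B" then pvNl H W rc.1 rc.2 else [])) g h =
      pvAltCells H W (cl.flatMap (fun rc =>
        if pvCell grid rc.1 rc.2 = "B" then [rc] else [])) g h := by
  induction cl generalizing g h with
  | nil => simp [pvApply, pvAltCells]
  | cons rc rest ih =>
    obtain ⟨r, c⟩ := rc
    by_cases hB : pvCell grid r c = "B"
    · simp only [List.flatMap_cons, hB, if_pos]
      rw [pvApply_append]
      have hc : pvApply (pvNl H W r c) g h = pvAltCell H W r c pvUpdates g h := by
        rw [pvAltCell_eq]; rfl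
      rw [hc]
      simp only [List.singleton_append, pvAltCells]
      rcases hres : pvAltCell H W r c pvUpdates g h with ⟨fl, g', h'⟩
      cases fl <;> simp [ih]
    · simp [hB, ih]

-- A's nested range-fold, rewritten as a flatMap over row-major cells
theorem pvShapeA_inner (grid : List (List String)) (H W r : Nat) :
    ∀ (cols : List Nat) (acc : List (Nat × Nat)),
    cols.foldl (fun acc c =>
        if pvCell grid r c = "B" then
          pvUpdates.foldl (fun acc up =>
            if pvInB H W ((r:Int) + up.1) ((c:Int) + up.2) then
              acc ++ [(((r:Int) + up.1).toNat, ((c:Int) + up.2).toNat)]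
            else acc) acc
        else acc) acc =
      acc ++ cols.flatMap (fun c =>
        if pvCell grid r c = "B" then pvNl H W r c else []) := by
  intro cols
  induction cols with
  | nil => simp
  | cons c rest ih =>
    intro acc
    by_cases hB : pvCell grid r c = "B"
    · simp only [List.foldl_cons, hB, if_pos, List.flatMap_cons]
      rw [PySem.List.foldl_append_if, ih]
      simp [pvNl]
    · simp [hB, ih]

theorem pvShapeA (grid : List (List String)) (H W : Nat) :
    ∀ (rows : List Nat) (acc : List (Nat × Nat)),
    rows.foldl (fun acc r =>
      (List.range W).foldl (fun acc c =>
        if pvCell grid r c = "B" then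
          pvUpdates.foldl (fun acc up =>
            if pvInB H W ((r:Int) + up.1) ((c:Int) + up.2) then
              acc ++ [(((r:Int) + up.1).toNat, ((c:Int) + up.2).toNat)]
            else acc) acc
        else acc) acc) acc =
      acc ++ rows.flatMap (fun r => (List.range W).flatMap (fun c =>
        if pvCell grid r c = "B" then pvNl H W r c else [])) := by
  intro rows
  induction rows with
  | nil => simp
  | cons r rest ih =>
    intro acc
    simp only [List.foldl_cons, List.flatMap_cons]
    rw [pvShapeA_inner, ih, List.append_assoc]

theorem pvShapeB_inner (grid : List (List String)) (r : Nat) :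
    ∀ (cols : List Nat) (acc : List (Nat × Nat)),
    cols.foldl (fun acc c =>
        if pvCell grid r c = "B" then acc ++ [(r, c)] else acc) acc =
      acc ++ cols.flatMap (fun c =>
        if pvCell grid r c = "B" then [(r, c)] else []) := by
  intro cols
  induction cols with
  | nil => simp
  | cons c rest ih =>
    intro acc
    by_cases hB : pvCell grid r c = "B" <;> simp [hB, ih]

theorem pvShapeB (grid : List (List String)) (W : Nat) :
    ∀ (rows : List Nat) (acc : List (Nat × Nat)),
    rows.foldl (fun acc r =>
      (List.range W).foldl (fun acc c =>
        if pvCell grid r c = "B" then acc ++ [(r, c)] else acc) acc) acc =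
      acc ++ rows.flatMap (fun r => (List.range W).flatMap (fun c =>
        if pvCell grid r c = "B" then [(r, c)] else [])) := by
  intro rows
  induction rows with
  | nil => simp
  | cons r rest ih =>
    intro acc
    simp only [List.foldl_cons, List.flatMap_cons]
    rw [pvShapeB_inner, ih, List.append_assoc]

-- nested flatMap over the two ranges = one flatMap over the row-major cell list
theorem pvNested (rows cols : List Nat) (G : Nat → Nat → List (Nat × Nat)) :
    rows.flatMap (fun r => cols.flatMap (fun c => G r c)) =
      (rows.flatMap (fun r => cols.map (Prod.mk r))).flatMap (fun rc => G rc.1 rc.2) := by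
  induction rows with
  | nil => simp
  | cons r rest ih => simp [ih, List.flatMap_map]

-- ===== VERDICT (by name: the statement is the Claim_ definition above) =====
theorem bound_B_spec : Claim_equal_bound_B := by
  intro grid _ _
  show bound_B grid = bound_B_alt grid
  simp only [bound_B, bound_B_alt]
  rw [pvShapeA grid grid.length (grid.headD []).length,
    pvShapeB grid (grid.headD []).length, List.nil_append, List.nil_append,
    pvNested _ _ (fun r c => if pvCell grid r c = "B" then pvNl grid.length (grid.headD []).length r c else []),
    pvNested _ _ (fun r c => if pvCell grid r c = "B" then [(r, c)] else [])]
  exact pv_main _ _ grid _ grid 0
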